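-- pv_equiv track=rewrite | github.com/Jack409M/shelter-kiosk | core/rent_reporting_service.py | _month_sequence_ending
-- ===== SOURCE A (Python) =====
-- def _month_sequence_ending(year: int, month: int, count: int = 12) -> list[tuple[int, int]]:
--     values: list[tuple[int, int]] = []
--     y = year
--     m = month
--     for _ in range(count):
--         values.append((y, m))
--         m -= 1
--         if m == 0:
--             m = 12
--             y -= 1
--     return list(reversed(values))
-- ===== SOURCE B (Python) =====
-- def _month_sequence_ending(year: int, month: int, count: int = 12) -> list[tuple[int, int]]:
--     # month trace, latest first (January wraps back to December)
--     months = []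
--     m = month
--     for _ in range(count):
--         months.append(m)
--         m = 12 if m == 1 else m - 1
--     # year trace: the year steps back once per January in the month trace
--     years = []
--     y = year
--     for m in months:
--         years.append(y)
--         if m == 1:
--             y -= 1
--     return list(zip(reversed(years), reversed(months)))
-- ===== Notes on version B (the rewrite author's own statement) =====
-- stated objective: alternative
-- what changed: Replaces the single fused loop over (year, month) pairs followed by a reversal with a structure-of-arrays decomposition: one pass builds the backward month trace alone, a second pass derives the year trace from the Januaries in it, and the result is the zip of the two reversed traces.
import Mathlib
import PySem

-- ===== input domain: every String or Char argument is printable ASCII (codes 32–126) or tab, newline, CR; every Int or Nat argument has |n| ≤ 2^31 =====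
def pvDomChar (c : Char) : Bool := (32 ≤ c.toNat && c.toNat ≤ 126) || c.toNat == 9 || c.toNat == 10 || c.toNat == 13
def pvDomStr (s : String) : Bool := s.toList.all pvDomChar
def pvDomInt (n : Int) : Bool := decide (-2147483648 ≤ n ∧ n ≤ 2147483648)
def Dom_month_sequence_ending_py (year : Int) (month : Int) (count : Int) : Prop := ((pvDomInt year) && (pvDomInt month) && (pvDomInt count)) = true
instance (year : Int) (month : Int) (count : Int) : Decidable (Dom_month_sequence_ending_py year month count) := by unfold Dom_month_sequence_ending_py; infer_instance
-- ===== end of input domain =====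

-- B replaces A's fused loop over (year, month) pairs + final reversal with a
-- structure-of-arrays decomposition: a month-trace pass, a year-trace pass driven by
-- the Januaries in it, and a zip of the reversed traces; same cost ("alternative").


-- ===== PORT A =====
-- literal transliteration of A: build the pair list forward by decrementing the month
-- (wrap at 0), then reverse
def month_sequence_ending_py (year : Int) (month : Int) (count : Int) : List (Int × Int) :=
  let st := (PySem.List.pyRange 0 count 1).foldl
    (fun (st : List (Int × Int) × Int × Int) _ =>
      let values := st.1 ++ [(st.2.1, st.2.2)]
      let m := st.2.2 - 1
      if m = 0 then (values, st.2.1 - 1, 12) else (values, st.2.1, m))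
    ([], year, month)
  st.1.reverse

-- ===== PORT B =====
-- transliteration of Source B: month trace, then year trace from its Januaries, then zip
def month_sequence_ending_py_alt (year : Int) (month : Int) (count : Int) : List (Int × Int) :=
  let ms := (PySem.List.pyRange 0 count 1).foldl
    (fun (st : List Int × Int) _ =>
      (st.1 ++ [st.2], if st.2 = 1 then 12 else st.2 - 1))
    ([], month)
  let months := ms.1
  let ys := months.foldl
    (fun (st : List Int × Int) m =>
      (st.1 ++ [st.2], if m = 1 then st.2 - 1 else st.2))
    ([], year)
  let years := ys.1
  List.zip years.reverse months.reverse

-- ===== PRECONDITION & SPEC =====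
def Spec_month_sequence_ending_py (year : Int) (month : Int) (count : Int) (out : List (Int × Int)) : Prop := out = month_sequence_ending_py_alt year month count
instance (year : Int) (month : Int) (count : Int) (out : List (Int × Int)) : Decidable (Spec_month_sequence_ending_py year month count out) := by unfold Spec_month_sequence_ending_py; infer_instance

-- ===== CLAIM (what is proved, stated in full; the proofs are below) =====
def Claim_equal_month_sequence_ending_py : Prop := ∀ (year : Int) (month : Int) (count : Int), Dom_month_sequence_ending_py year month count → Spec_month_sequence_ending_py year month count (month_sequence_ending_py year month count)

-- ===== LEMMAS AND PROOFS =====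

-- A's per-iteration state transition on (y, m)
def pvStep (p : Int × Int) : Int × Int :=
  if p.2 - 1 = 0 then (p.1 - 1, 12) else (p.1, p.2 - 1)

-- A's loop, characterised: after n iterations the list is the first n iterates of
-- pvStep and the state is the n-th iterate.
theorem pvLoop_eq (year month : Int) (n : ℕ) :
    (List.range n).foldl
      (fun (st : List (Int × Int) × Int × Int) _ =>
        let values := st.1 ++ [(st.2.1, st.2.2)]
        let m := st.2.2 - 1
        if m = 0 then (values, st.2.1 - 1, 12) else (values, st.2.1, m))
      ([], year, month)
    = ((List.range n).map (fun j => pvStep^[j] (year, month)), pvStep^[n] (year, month)) := by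
  induction n with
  | zero => simp
  | succ n ih =>
    rw [List.range_succ, List.foldl_append, ih]
    rcases h : pvStep^[n] (year, month) with ⟨y, m⟩
    simp only [List.foldl_cons, List.foldl_nil, List.map_append, List.map_cons, List.map_nil,
      Function.iterate_succ_apply', h]
    by_cases hm : m - 1 = 0 <;> simp [pvStep, hm]

-- B's month loop produces the second components of the same iterates
theorem pvMonths_eq (year month : Int) (n : ℕ) :
    (List.range n).foldl
      (fun (st : List Int × Int) _ =>
        (st.1 ++ [st.2], if st.2 = 1 then 12 else st.2 - 1))
      ([], month)
    = ((List.range n).map (fun j => (pvStep^[j] (year, month)).2),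
       (pvStep^[n] (year, month)).2) := by
  induction n with
  | zero => simp
  | succ n ih =>
    rw [List.range_succ, List.foldl_append, ih]
    rcases h : pvStep^[n] (year, month) with ⟨y, m⟩
    simp only [List.foldl_cons, List.foldl_nil, List.map_append, List.map_cons, List.map_nil,
      Function.iterate_succ_apply', h]
    by_cases hm : m = 1
    · simp [pvStep, hm]
    · simp [pvStep, hm, show m - 1 ≠ 0 from by omega]

-- B's year loop, run over that month trace, produces the first components
theorem pvYears_eq (year month : Int) (n : ℕ) :
    ((List.range n).map (fun j => (pvStep^[j] (year, month)).2)).foldl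
      (fun (st : List Int × Int) m =>
        (st.1 ++ [st.2], if m = 1 then st.2 - 1 else st.2))
      ([], year)
    = ((List.range n).map (fun j => (pvStep^[j] (year, month)).1),
       (pvStep^[n] (year, month)).1) := by
  induction n with
  | zero => simp
  | succ n ih =>
    rw [List.range_succ, List.map_append, List.foldl_append, ih]
    rcases h : pvStep^[n] (year, month) with ⟨y, m⟩
    simp only [List.foldl_cons, List.foldl_nil, List.map_append, List.map_cons, List.map_nil,
      Function.iterate_succ_apply', h]
    by_cases hm : m = 1
    · simp [pvStep, hm]
    · simp [pvStep, hm, show m - 1 ≠ 0 from by omega]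

-- ===== VERDICT (by name: the statement is the Claim_ definition above) =====
theorem month_sequence_ending_py_spec : Claim_equal_month_sequence_ending_py := by
  intro year month count _
  unfold Spec_month_sequence_ending_py month_sequence_ending_py month_sequence_ending_py_alt
  simp only [PySem.List.pyRange_one, List.foldl_map]
  rw [pvLoop_eq, pvMonths_eq year month]
  simp only
  rw [pvYears_eq year month]
  simp only [← List.map_reverse, List.zip_map']
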